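-- pv_equiv track=rewrite | github.com/taozi8887/TOA | songpack_ui.py | calculate_nps_range
-- ===== SOURCE A (Python) =====
-- def calculate_nps_range(level_notes):
--     """Calculate min-max NPS range from level notes"""
--     if not level_notes:
--         return None, None
--
--     # Group notes by second
--     notes_by_second = {}
--     for note in level_notes:
--         second = int(note.get('t', 0))
--         notes_by_second[second] = notes_by_second.get(second, 0) + 1
--
--     if not notes_by_second:
--         return None, None
--
--     nps_values = list(notes_by_second.values())
--     return min(nps_values), max(nps_values)
-- ===== SOURCE B (Python) =====
-- from itertools import groupby
--
--
-- def calculate_nps_range(level_notes):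
--     """Calculate min-max NPS range from level notes"""
--     if not level_notes:
--         return None, None
--
--     seconds = sorted(int(note.get('t', 0)) for note in level_notes)
--     counts = [sum(1 for _ in grp) for _, grp in groupby(seconds)]
--     return min(counts), max(counts)
-- ===== Notes on version B (the rewrite author's own statement) =====
-- stated objective: alternative
-- what changed: Replaces the dict accumulator with sort-then-run-length-count: collect each note's second, sort the list, count group run lengths with itertools.groupby, and take min/max of those counts.
import Mathlib
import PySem

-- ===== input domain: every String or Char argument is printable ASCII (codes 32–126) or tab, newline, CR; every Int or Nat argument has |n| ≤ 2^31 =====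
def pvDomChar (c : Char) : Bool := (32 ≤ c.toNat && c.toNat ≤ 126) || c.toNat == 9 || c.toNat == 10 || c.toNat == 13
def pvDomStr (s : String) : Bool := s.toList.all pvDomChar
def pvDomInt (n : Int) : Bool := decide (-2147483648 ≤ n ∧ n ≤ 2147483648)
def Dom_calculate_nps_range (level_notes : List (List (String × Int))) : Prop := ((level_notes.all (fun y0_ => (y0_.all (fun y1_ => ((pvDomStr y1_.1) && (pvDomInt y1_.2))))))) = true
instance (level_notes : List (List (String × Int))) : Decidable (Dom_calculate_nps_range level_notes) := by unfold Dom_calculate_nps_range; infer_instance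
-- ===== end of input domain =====

-- B replaces A's dict accumulator with sort + run-length counting (alternative algorithm, same result).

-- ===== PORT A =====
-- int(note.get('t', 0)): first match in the note's association list, default 0; int() on an int is identity
def noteT (note : List (String × Int)) : Int := (PySem.Dict.mk note).getD "t" 0

def calculate_nps_range (level_notes : List (List (String × Int))) : Option Int × Option Int :=
  if level_notes = [] then (none, none)
  else
    let notes_by_second : PySem.Dict Int Int :=
      level_notes.foldl (fun d note =>
        let second := noteT note
        d.insert second (d.getD second 0 + 1)) PySem.Dict.empty
    if notes_by_second.items = [] then (none, none)
    else
      let nps_values := notes_by_second.values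
      (PySem.List.min? nps_values (fun x => x), PySem.List.max? nps_values (fun x => x))

-- ===== PORT B =====
-- itertools.groupby run-length pass over the sorted seconds
def rlAux (cur : Int) (cnt : Int) : List Int → List Int
  | [] => [cnt]
  | x :: xs => if x = cur then rlAux cur (cnt + 1) xs else cnt :: rlAux x 1 xs

def runLengths : List Int → List Int
  | [] => []
  | x :: xs => rlAux x 1 xs

def calculate_nps_range_alt (level_notes : List (List (String × Int))) : Option Int × Option Int :=
  if level_notes = [] then (none, none)
  else
    let seconds := PySem.List.sorted (level_notes.map noteT) (fun x => x) false
    let counts := runLengths seconds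
    (PySem.List.min? counts (fun x => x), PySem.List.max? counts (fun x => x))

-- ===== PRECONDITION & SPEC =====
def Spec_calculate_nps_range (level_notes : List (List (String × Int))) (out : Option Int × Option Int) : Prop := out = calculate_nps_range_alt level_notes
instance (level_notes : List (List (String × Int))) (out : Option Int × Option Int) : Decidable (Spec_calculate_nps_range level_notes out) := by unfold Spec_calculate_nps_range; infer_instance

-- ===== CLAIM (what is proved, stated in full; the proofs are below) =====
def Claim_equal_calculate_nps_range : Prop := ∀ (level_notes : List (List (String × Int))), Dom_calculate_nps_range level_notes → Spec_calculate_nps_range level_notes (calculate_nps_range level_notes)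

-- ===== LEMMAS AND PROOFS =====


lemma min?_id_perm {xs ys : List Int} (h : xs.Perm ys) :
    PySem.List.min? xs (fun x => x) = PySem.List.min? ys (fun x => x) := by
  cases hx : PySem.List.min? xs (fun x => x) with
  | none =>
    rw [PySem.List.min?_eq_none_iff] at hx
    subst hx
    rw [List.Perm.eq_nil (h.symm)] at *; simp [PySem.List.min?]
  | some m =>
    cases hy : PySem.List.min? ys (fun x => x) with
    | none =>
      rw [PySem.List.min?_eq_none_iff] at hy
      subst hy
      rw [List.Perm.eq_nil h] at hx
      simp [PySem.List.min?] at hx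
    | some m' =>
      have hm := PySem.List.min?_mem hx
      have hm' := PySem.List.min?_mem hy
      have h1 : m ≤ m' := PySem.List.min?_isMin hx m' (h.mem_iff.mpr hm')
      have h2 : m' ≤ m := PySem.List.min?_isMin hy m (h.mem_iff.mp hm)
      exact congrArg some (le_antisymm h1 h2)

lemma max?_id_perm {xs ys : List Int} (h : xs.Perm ys) :
    PySem.List.max? xs (fun x => x) = PySem.List.max? ys (fun x => x) := by
  cases hx : PySem.List.max? xs (fun x => x) with
  | none =>
    rw [PySem.List.max?_eq_none_iff] at hx
    subst hx
    rw [List.Perm.eq_nil (h.symm)] at *; simp [PySem.List.max?]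
  | some m =>
    cases hy : PySem.List.max? ys (fun x => x) with
    | none =>
      rw [PySem.List.max?_eq_none_iff] at hy
      subst hy
      rw [List.Perm.eq_nil h] at hx
      simp [PySem.List.max?] at hx
    | some m' =>
      have hm := PySem.List.max?_mem hx
      have hm' := PySem.List.max?_mem hy
      have h1 : m' ≤ m := PySem.List.max?_isMax hx m' (h.mem_iff.mpr hm')
      have h2 : m ≤ m' := PySem.List.max?_isMax hy m (h.mem_iff.mp hm)
      exact congrArg some (le_antisymm h2 h1)


lemma foldl_add_filter {x : Int} : ∀ (xs s : List Int), x ∈ s →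
    xs.foldl PySem.Set.add s = (xs.filter (fun y => y ≠ x)).foldl PySem.Set.add s := by
  intro xs
  induction xs with
  | nil => intro s _; rfl
  | cons y ys ih =>
    intro s hs
    by_cases hyx : y = x
    · subst hyx
      have hadd : PySem.Set.add s y = s := by
        simp [PySem.Set.add, PySem.Set.contains, hs]
      simp only [List.foldl_cons, List.filter_cons]
      simp [hadd, ih s hs]
    · simp only [List.foldl_cons, List.filter_cons]
      have : x ∈ PySem.Set.add s y := by
        simp [PySem.Set.add]; split <;> simp [hs]
      simp [hyx, ih _ this]

lemma foldl_add_cons {x : Int} : ∀ (xs s : List Int), x ∉ xs → x ∉ s →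
    xs.foldl PySem.Set.add (x :: s) = x :: xs.foldl PySem.Set.add s := by
  intro xs
  induction xs with
  | nil => intro s _ _; rfl
  | cons y ys ih =>
    intro s hxs hs
    have hyx : y ≠ x := by intro e; exact hxs (e ▸ List.mem_cons_self ..)
    have hstep : PySem.Set.add (x :: s) y = x :: PySem.Set.add s y := by
      simp only [PySem.Set.add, PySem.Set.contains]
      by_cases hys : y ∈ s <;> simp [hys, hyx]
    simp only [List.foldl_cons, hstep]
    refine ih _ (fun h => hxs (List.mem_cons_of_mem _ h)) ?_
    simp [PySem.Set.add]; split <;> simp [hs, Ne.symm hyx]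

lemma dedup_cons_filter (x : Int) (xs : List Int) :
    PySem.List.dedup (x :: xs) = x :: PySem.List.dedup (xs.filter (fun y => y ≠ x)) := by
  have h1 : PySem.List.dedup (x :: xs) = xs.foldl PySem.Set.add [x] := by
    simp [PySem.List.dedup_eq_ofList, PySem.Set.ofList_eq_foldl]
  have h2 : PySem.List.dedup (xs.filter (fun y => y ≠ x))
      = (xs.filter (fun y => y ≠ x)).foldl PySem.Set.add [] := by
    simp [PySem.List.dedup_eq_ofList, PySem.Set.ofList_eq_foldl]
  rw [h1, h2, foldl_add_filter (x := x) xs [x] (by simp)]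
  exact foldl_add_cons (x := x) _ [] (by simp) (by simp)


lemma rlAux_spec : ∀ (t : List Int) (cur cnt : Int),
    t.Pairwise (· ≤ ·) → (∀ y ∈ t, cur ≤ y) →
    rlAux cur cnt t
      = (cnt + t.count cur) ::
        (PySem.List.dedup (t.filter (fun y => y ≠ cur))).map (fun k => (t.count k : Int)) := by
  intro t
  induction t with
  | nil => intro cur cnt _ _; simp [rlAux]
  | cons x xs ih =>
    intro cur cnt hp hge
    have hpxs : xs.Pairwise (· ≤ ·) := hp.of_cons
    have hx_le : ∀ y ∈ xs, x ≤ y := (List.pairwise_cons.mp hp).1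
    by_cases hxc : x = cur
    · subst hxc
      rw [rlAux, if_pos rfl, ih x (cnt + 1) hpxs hx_le]
      have hfil : (x :: xs).filter (fun y => y ≠ x) = xs.filter (fun y => y ≠ x) := by
        simp
      rw [List.count_cons_self, hfil]
      refine List.cons_eq_cons.mpr ⟨by push_cast; ring, ?_⟩
      · apply List.map_congr_left
        intro k hk
        have : k ∈ xs.filter (fun y => y ≠ x) := (PySem.List.mem_dedup _ _).mp hk
        have hkne : k ≠ x := by
          have := List.of_mem_filter this
          simpa using this
        simp [Ne.symm hkne]
    · have hlt : cur < x := lt_of_le_of_ne (hge x (List.mem_cons_self ..)) (Ne.symm hxc)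
      have hnc : ∀ y ∈ x :: xs, y ≠ cur := by
        intro y hy
        rcases List.mem_cons.mp hy with rfl | hy'
        · exact hxc
        · exact fun e => absurd (e ▸ hx_le y hy') (not_le.mpr (e ▸ hlt))
      rw [rlAux, if_neg hxc, ih x 1 hpxs hx_le]
      have hcnt0 : (x :: xs).count cur = 0 := by
        rw [List.count_eq_zero]
        intro h; exact hnc cur h rfl
      have hfil : (x :: xs).filter (fun y => y ≠ cur) = x :: xs := by
        apply List.filter_eq_self.mpr
        intro a ha; simpa using hnc a ha
      rw [hcnt0, hfil, dedup_cons_filter]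
      simp only [List.map_cons, List.count_cons_self]
      refine List.cons_eq_cons.mpr ⟨by push_cast; ring, List.cons_eq_cons.mpr ⟨by push_cast; ring, ?_⟩⟩
      · apply List.map_congr_left
        intro k hk
        have : k ∈ xs.filter (fun y => y ≠ x) := (PySem.List.mem_dedup _ _).mp hk
        have hkne : k ≠ x := by simpa using List.of_mem_filter this
        simp [Ne.symm hkne]

lemma runLengths_spec (ys : List Int) (h : ys.Pairwise (· ≤ ·)) :
    runLengths ys = (PySem.List.dedup ys).map (fun k => (ys.count k : Int)) := by
  cases ys with
  | nil => simp [runLengths, PySem.List.dedup]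
  | cons x xs =>
    have hx_le : ∀ y ∈ xs, x ≤ y := (List.pairwise_cons.mp h).1
    rw [runLengths, rlAux_spec xs x 1 h.of_cons hx_le, dedup_cons_filter]
    simp only [List.map_cons, List.count_cons_self]
    refine List.cons_eq_cons.mpr ⟨by push_cast; ring, ?_⟩
    · apply List.map_congr_left
      intro k hk
      have : k ∈ xs.filter (fun y => y ≠ x) := (PySem.List.mem_dedup _ _).mp hk
      have hkne : k ≠ x := by simpa using List.of_mem_filter this
      simp [Ne.symm hkne]

-- ===== VERDICT (by name: the statement is the Claim_ definition above) =====
theorem calculate_nps_range_spec : Claim_equal_calculate_nps_range := by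
  intro level_notes _dom
  unfold Spec_calculate_nps_range calculate_nps_range calculate_nps_range_alt
  by_cases h : level_notes = []
  · simp [h]
  · simp only [if_neg h]
    set seconds := level_notes.map noteT with hsec
    have hfold : level_notes.foldl (fun d note =>
        let second := noteT note
        d.insert second (d.getD second 0 + 1)) PySem.Dict.empty
        = PySem.Dict.counter seconds := by
      rw [hsec, ← PySem.Dict.foldl_insert_getD_add_one_eq_counter, List.foldl_map]
    rw [hfold]
    have hsecne : seconds ≠ [] := by
      simpa [hsec] using h
    obtain ⟨s0, rest, hrest⟩ := List.exists_cons_of_ne_nil hsecne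
    have hofne : PySem.Set.ofList seconds ≠ [] := by
      intro he
      have : s0 ∈ PySem.Set.ofList seconds := (PySem.Set.mem_ofList _ _).mpr (hrest ▸ List.mem_cons_self ..)
      simp [he] at this
    have hitems : (PySem.Dict.counter seconds).items
        = (PySem.Set.ofList seconds).map (fun k => (k, (seconds.count k : Int))) :=
      PySem.Dict.items_counter seconds
    have hitemsne : (PySem.Dict.counter seconds).items ≠ [] := by
      rw [hitems]; simpa using hofne
    rw [if_neg hitemsne]
    have hvals : (PySem.Dict.counter seconds).values
        = (PySem.Set.ofList seconds).map (fun k => (seconds.count k : Int)) := by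
      simp only [PySem.Dict.values, hitems, List.map_map]
      rfl
    -- B side
    set ss := PySem.List.sorted seconds (fun x => x) false with hss
    have hperm : ss.Perm seconds := PySem.List.sorted_perm seconds (fun x => x) false
    have hpair : ss.Pairwise (· ≤ ·) := by
      simpa using PySem.List.sorted_pairwise seconds (fun x => x)
    have hcounts : runLengths ss
        = (PySem.List.dedup ss).map (fun k => (seconds.count k : Int)) := by
      rw [runLengths_spec ss hpair]
      exact List.map_congr_left (fun k _ => by rw [hperm.count_eq])
    have hdperm : (PySem.List.dedup ss).Perm (PySem.Set.ofList seconds) := by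
      have : (PySem.List.dedup ss).Perm (PySem.List.dedup seconds) := by
        rw [List.perm_ext_iff_of_nodup (PySem.List.nodup_dedup _) (PySem.List.nodup_dedup _)]
        intro a
        rw [PySem.List.mem_dedup, PySem.List.mem_dedup, hperm.mem_iff]
      simpa using this
    have hvperm : (runLengths ss).Perm ((PySem.Dict.counter seconds).values) := by
      rw [hcounts, hvals]
      exact hdperm.map _
    exact Prod.ext (min?_id_perm hvperm).symm (max?_id_perm hvperm).symm
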